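-- pv_equiv track=rewrite | github.com/VaHiX/CodeForces | Python/ByTier/D/1926_D_Vlad_and_Division.py | solve
-- ===== SOURCE A (Python) =====
-- def solve(a):
--     hv = (1 << 31) - 1  # All 31 bits set to 1
--     c = 0
--     dct = {}
--     for num in a:
--         dup = hv ^ num  # Bitwise complement of num (flip all 31 bits)
--         if dct.get(num, 0) == 0:  # If we haven't seen this number before
--             c += 1  # Start a new group
--             dct[dup] = dct.get(dup, 0) + 1  # Mark its complement as used
--         else:
--             dct[num] -= 1  # Reduce count of this number (reuse from existing group)
--     return c
-- ===== SOURCE B (Python) =====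
-- def solve(a):
--     hv = (1 << 31) - 1
--     cnt = {}
--     for x in a:
--         cnt[x] = cnt.get(x, 0) + 1
--     matched = sum(min(v, cnt.get(hv ^ x, 0)) for x, v in cnt.items())
--     return len(a) - matched // 2
-- ===== Notes on version B (the rewrite author's own statement) =====
-- stated objective: simpler
-- what changed: Replaces A's online greedy scan that consumes/places complement markers in a dict with a two-phase computation: build a frequency table once, sum min(count[x], count[complement x]) over distinct keys, halve it, and subtract from len(a).
import Mathlib
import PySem

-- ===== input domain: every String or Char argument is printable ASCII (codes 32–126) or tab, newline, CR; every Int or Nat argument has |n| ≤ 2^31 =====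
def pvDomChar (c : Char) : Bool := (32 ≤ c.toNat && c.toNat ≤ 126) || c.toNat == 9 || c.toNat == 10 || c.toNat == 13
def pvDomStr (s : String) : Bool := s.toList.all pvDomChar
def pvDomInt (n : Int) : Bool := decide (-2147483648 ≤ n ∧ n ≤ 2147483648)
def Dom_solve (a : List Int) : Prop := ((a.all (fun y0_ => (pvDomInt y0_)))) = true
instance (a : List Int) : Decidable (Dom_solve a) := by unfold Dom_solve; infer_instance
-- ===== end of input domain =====

-- B replaces A's online greedy marker-consuming scan with a frequency-table-then-pair computation (objective: simpler).

-- ===== PORT A =====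
-- loop body of A's for-loop (dct[num] -= 1 overwrites an existing key, hence getD/insert)
def solveStep (hv : Int) (st : Int × PySem.Dict Int Int) (num : Int) : Int × PySem.Dict Int Int :=
  let c := st.1
  let dct := st.2
  let dup := PySem.Int.bxor hv num
  if dct.getD num 0 == 0 then
    (c + 1, dct.insert dup (dct.getD dup 0 + 1))
  else
    (c, dct.insert num (dct.getD num 0 - 1))

def solve (a : List Int) : Int :=
  let hv : Int := ((1 : Int) <<< (31 : Nat)) - 1
  (a.foldl (solveStep hv) (0, PySem.Dict.empty)).1

-- ===== PORT B =====
def solve_alt (a : List Int) : Int :=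
  let hv : Int := ((1 : Int) <<< (31 : Nat)) - 1
  let cnt : PySem.Dict Int Int := a.foldl (fun d x => d.insert x (d.getD x 0 + 1)) PySem.Dict.empty
  let matched : Int := cnt.items.foldl (fun s p => s + min p.2 (cnt.getD (PySem.Int.bxor hv p.1) 0)) 0
  (a.length : Int) - PySem.Int.floordiv matched 2

-- ===== PRECONDITION & SPEC =====
def Spec_solve (a : List Int) (out : Int) : Prop := out = solve_alt a
instance (a : List Int) (out : Int) : Decidable (Spec_solve a out) := by unfold Spec_solve; infer_instance

-- ===== CLAIM (what is proved, stated in full; the proofs are below) =====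
def Claim_equal_solve : Prop := ∀ (a : List Int), Dom_solve a → Spec_solve a (solve a)

-- ===== LEMMAS AND PROOFS =====

-- the 31-bit complement (hv = 2147483647)
def cmpl (x : Int) : Int := PySem.Int.bxor 2147483647 x

lemma bxor_bxor_cancel (a b : Int) : PySem.Int.bxor a (PySem.Int.bxor a b) = b := by
  unfold PySem.Int.bxor
  rcases le_or_gt 0 a with ha | ha <;> rcases le_or_gt 0 b with hb | hb
  · have h1 : (0:Int) ≤ ↑(a.toNat ^^^ b.toNat) := Int.natCast_nonneg _
    simp only [if_pos ha, if_pos hb, if_pos h1, Int.toNat_natCast, Nat.xor_xor_cancel_left,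
      Int.toNat_of_nonneg hb]
  · have h1 : ¬ (0:Int) ≤ -↑(a.toNat ^^^ (-b - 1).toNat) - 1 := by
      have := Int.natCast_nonneg (a.toNat ^^^ (-b - 1).toNat); omega
    simp only [if_pos ha, if_neg (not_le.mpr hb), if_neg h1]
    have h2 : (-(-↑(a.toNat ^^^ (-b - 1).toNat) - 1) - 1 : Int) = ↑(a.toNat ^^^ (-b - 1).toNat) := by ring
    rw [h2]
    rw [Int.toNat_natCast, Nat.xor_xor_cancel_left]
    omega
  · have h1 : ¬ (0:Int) ≤ -↑((-a - 1).toNat ^^^ b.toNat) - 1 := by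
      have := Int.natCast_nonneg ((-a - 1).toNat ^^^ b.toNat); omega
    simp only [if_neg (not_le.mpr ha), if_pos hb, if_neg h1]
    have h2 : (-(-↑((-a - 1).toNat ^^^ b.toNat) - 1) - 1 : Int) = ↑((-a - 1).toNat ^^^ b.toNat) := by ring
    rw [h2]
    rw [Int.toNat_natCast, Nat.xor_xor_cancel_left]
    exact Int.toNat_of_nonneg hb
  · have h1 : (0:Int) ≤ (↑((-a - 1).toNat ^^^ (-b - 1).toNat) : Int) := Int.natCast_nonneg _
    simp only [if_neg (not_le.mpr ha), if_neg (not_le.mpr hb), if_pos h1, Int.toNat_natCast,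
      Nat.xor_xor_cancel_left]
    omega

lemma bxor_eq_right (a b : Int) (h : PySem.Int.bxor a b = b) : a = 0 := by
  have := bxor_bxor_cancel b a
  rw [PySem.Int.bxor_comm b a, h, PySem.Int.bxor_self] at this
  omega

lemma cmpl_cmpl (x : Int) : cmpl (cmpl x) = x := bxor_bxor_cancel 2147483647 x

lemma cmpl_ne (x : Int) : cmpl x ≠ x := by
  intro h
  have := bxor_eq_right 2147483647 x h
  norm_num at this

lemma cmpl_eq_iff (k x : Int) : cmpl k = x ↔ k = cmpl x := by
  constructor
  · intro h; rw [← h, cmpl_cmpl]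
  · intro h; rw [h, cmpl_cmpl]

-- indicator: processing x after prefix p starts a new group in A
def ind (p : List Int) (x : Int) : Int :=
  if p.count (cmpl x) ≤ p.count x then 1 else 0

-- number of new groups A opens while processing r after prefix p
def G (p r : List Int) : Int :=
  match r with
  | [] => 0
  | x :: r' => ind p x + G (p ++ [x]) r'

-- the Finset form of B's matched sum
def S (a : List Int) : Int :=
  ∑ k ∈ a.toFinset, min (a.count k : Int) (a.count (cmpl k) : Int)

lemma count_append_int (l : List Int) (x k : Int) :
    (((l ++ [x]).count k : Int)) = (l.count k : Int) + (if k = x then 1 else 0) := by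
  rw [List.count_append]
  by_cases h : k = x
  · subst h; simp
  · simp [List.count_singleton', h]
    omega

lemma salt_eq (a : List Int) :
    solve_alt a = (a.length : Int) - PySem.Int.floordiv (S a) 2 := by
  have hv : ((1:Int) <<< (31 : Nat)) - 1 = 2147483647 := by decide
  simp only [solve_alt, hv, PySem.Dict.foldl_insert_getD_add_one_eq_counter]
  simp only [PySem.List.foldl_add]
  rw [PySem.Dict.items_counter, List.map_map]
  have hmap : ((fun p : Int × Int => min p.2 ((PySem.Dict.counter a).getD (PySem.Int.bxor 2147483647 p.1) 0)) ∘
      fun k => (k, (List.count k a : Int))) = fun k => min (a.count k : Int) (a.count (cmpl k) : Int) := by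
    funext k
    simp [Function.comp, PySem.Dict.getD_counter, cmpl]
  rw [hmap]
  rw [← List.sum_toFinset _ (PySem.Set.nodup_ofList a)]
  have hfs : (PySem.Set.ofList a).toFinset = a.toFinset := by
    ext k; simp [PySem.Set.mem_ofList]
  rw [hfs, zero_add]
  rfl

lemma S_append (l : List Int) (x : Int) :
    S (l ++ [x]) = S l + 2 - 2 * ind l x := by
  have hne : cmpl x ≠ x := cmpl_ne x
  have hF : (l ++ [x]).toFinset = insert x l.toFinset := by ext k; simp
  have hS : S (l ++ [x]) = ∑ k ∈ insert x l.toFinset,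
      min (((l ++ [x]).count k : Int)) (((l ++ [x]).count (cmpl k) : Int)) := by
    rw [S, hF]
  have h1 : ∑ k ∈ insert x l.toFinset,
      min (((l ++ [x]).count k : Int)) (((l ++ [x]).count (cmpl k) : Int))
      = ∑ k ∈ insert x l.toFinset,
          min ((l.count k : Int)) ((l.count (cmpl k) : Int))
        + ∑ k ∈ insert x l.toFinset,
          (min (((l ++ [x]).count k : Int)) (((l ++ [x]).count (cmpl k) : Int))
            - min ((l.count k : Int)) ((l.count (cmpl k) : Int))) := by
    rw [Finset.sum_sub_distrib]; ring
  have h2 : ∑ k ∈ insert x l.toFinset, min ((l.count k : Int)) ((l.count (cmpl k) : Int)) = S l := by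
    by_cases hx : x ∈ l.toFinset
    · rw [Finset.insert_eq_self.mpr hx]; rfl
    · rw [Finset.sum_insert hx]
      have hz : (l.count x : Int) = 0 := by
        simp [List.count_eq_zero.mpr (fun h => hx (List.mem_toFinset.mpr h))]
      rw [S, hz]
      have : min (0:Int) ((l.count (cmpl x) : Int)) = 0 := by
        have := Int.natCast_nonneg (l.count (cmpl x)); omega
      rw [this, zero_add]
  have hside : ∀ c ∈ insert x l.toFinset, c ≠ x ∧ c ≠ cmpl x →
      min (((l ++ [x]).count c : Int)) (((l ++ [x]).count (cmpl c) : Int))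
        - min ((l.count c : Int)) ((l.count (cmpl c) : Int)) = 0 := by
    intro c _ ⟨hcx, hccx⟩
    have hc2 : ¬ (cmpl c = x) := fun h => hccx ((cmpl_eq_iff c x).mp h)
    rw [count_append_int, count_append_int, if_neg hcx, if_neg hc2]
    omega
  have h3 : ∑ k ∈ insert x l.toFinset,
      (min (((l ++ [x]).count k : Int)) (((l ++ [x]).count (cmpl k) : Int))
        - min ((l.count k : Int)) ((l.count (cmpl k) : Int))) = 2 - 2 * ind l x := by
    by_cases hc : cmpl x ∈ insert x l.toFinset
    · rw [Finset.sum_eq_add_of_mem x (cmpl x) (Finset.mem_insert_self x _) hc (Ne.symm hne) hside]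
      have e2 : (if cmpl x = x then (1:Int) else 0) = 0 := if_neg hne
      simp only [count_append_int, cmpl_cmpl, e2]
      unfold ind
      split_ifs with h <;> omega
    · rw [Finset.sum_eq_single_of_mem x (Finset.mem_insert_self x _)
        (fun b hb hbx => hside b hb ⟨hbx, fun h => hc (h ▸ hb)⟩)]
      have hcc : (l.count (cmpl x) : Int) = 0 := by
        have : cmpl x ∉ l := fun h => hc (Finset.mem_insert_of_mem (List.mem_toFinset.mpr h))
        simp [List.count_eq_zero.mpr this]
      rw [count_append_int l x x, count_append_int l x (cmpl x), if_pos rfl, if_neg hne, hcc]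
      have hind : ind l x = 1 := by
        unfold ind
        rw [if_pos]
        have : l.count (cmpl x) = 0 := by exact_mod_cast hcc
        omega
      rw [hind]
      have := Int.natCast_nonneg (l.count x); omega
  rw [hS, h1, h2, h3]; ring

lemma A_inv (r : List Int) : ∀ (p : List Int) (c : Int) (d : PySem.Dict Int Int),
    (∀ z, d.getD z 0 = max ((p.count (cmpl z) : Int) - (p.count z : Int)) 0) →
    (r.foldl (solveStep 2147483647) (c, d)).1 = c + G p r := by
  induction r with
  | nil => intro p c d _; simp [G]
  | cons x r' IH =>
    intro p c d hinv
    rw [List.foldl_cons]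
    have hx := hinv x
    have hbx : PySem.Int.bxor 2147483647 x = cmpl x := rfl
    by_cases hle : p.count (cmpl x) ≤ p.count x
    · have hz : d.getD x 0 = 0 := by rw [hx]; omega
      have hstep : solveStep 2147483647 (c, d) x
          = (c + 1, d.insert (cmpl x) (d.getD (cmpl x) 0 + 1)) := by
        simp [solveStep, hz, hbx]
      rw [hstep]
      have hinv' : ∀ z, (d.insert (cmpl x) (d.getD (cmpl x) 0 + 1)).getD z 0
          = max (((p ++ [x]).count (cmpl z) : Int) - ((p ++ [x]).count z : Int)) 0 := by
        intro z
        by_cases hz1 : z = cmpl x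
        · subst hz1
          rw [PySem.Dict.getD_insert_self, hinv (cmpl x), cmpl_cmpl,
            count_append_int, count_append_int, if_pos rfl, if_neg (cmpl_ne x)]
          omega
        · rw [PySem.Dict.getD_insert_of_ne _ _ _ hz1, hinv z,
            count_append_int, count_append_int]
          have hcz : (if cmpl z = x then (1:Int) else 0) = 0 := by
            rw [if_neg]; intro h; exact hz1 ((cmpl_eq_iff z x).mp h)
          rw [hcz]
          by_cases hz2 : z = x
          · subst hz2; rw [if_pos rfl]; omega
          · rw [if_neg hz2]; omega
      rw [IH (p ++ [x]) (c + 1) _ hinv']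
      have hG : G p (x :: r') = ind p x + G (p ++ [x]) r' := rfl
      rw [hG, ind, if_pos hle]
      ring
    · have hz : d.getD x 0 = (p.count (cmpl x) : Int) - (p.count x : Int) := by rw [hx]; omega
      have hnz : ¬ (d.getD x 0 = 0) := by
        rw [hz]; omega
      have hstep : solveStep 2147483647 (c, d) x
          = (c, d.insert x (d.getD x 0 - 1)) := by
        simp [solveStep, hnz]
      rw [hstep]
      have hinv' : ∀ z, (d.insert x (d.getD x 0 - 1)).getD z 0
          = max (((p ++ [x]).count (cmpl z) : Int) - ((p ++ [x]).count z : Int)) 0 := by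
        intro z
        by_cases hz1 : z = x
        · rw [hz1, PySem.Dict.getD_insert_self, hz, count_append_int, count_append_int, if_pos rfl]
          have hcz : (if cmpl x = x then (1:Int) else 0) = 0 := if_neg (cmpl_ne x)
          rw [hcz]
          omega
        · rw [PySem.Dict.getD_insert_of_ne _ _ _ hz1, hinv z,
            count_append_int, count_append_int, if_neg hz1]
          by_cases hz2 : z = cmpl x
          · subst hz2
            rw [cmpl_cmpl, if_pos rfl]
            omega
          · have hcz : (if cmpl z = x then (1:Int) else 0) = 0 := by
              rw [if_neg]; intro h; exact hz2 ((cmpl_eq_iff z x).mp h)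
            rw [hcz]
            omega
      rw [IH (p ++ [x]) c _ hinv']
      have hG : G p (x :: r') = ind p x + G (p ++ [x]) r' := rfl
      rw [hG, ind, if_neg hle]
      ring

lemma solve_eq_G (a : List Int) : solve a = G [] a := by
  have hv : ((1:Int) <<< (31 : Nat)) - 1 = 2147483647 := by decide
  show (a.foldl (solveStep (((1 : Int) <<< (31 : Nat)) - 1)) (0, PySem.Dict.empty)).1 = G [] a
  rw [hv, A_inv a [] 0 PySem.Dict.empty (by intro z; simp [PySem.Dict.getD_empty]), zero_add]

lemma G_append (r : List Int) : ∀ p x, G p (r ++ [x]) = G p r + ind (p ++ r) x := by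
  induction r with
  | nil => intro p x; simp [G]
  | cons y r' IH =>
    intro p x
    show ind p y + G (p ++ [y]) (r' ++ [x]) = ind p y + G (p ++ [y]) r' + ind (p ++ (y :: r')) x
    rw [IH (p ++ [y]) x]
    have : p ++ [y] ++ r' = p ++ (y :: r') := by simp
    rw [this]
    ring

lemma floordiv_add_two (m : Int) :
    PySem.Int.floordiv (m + 2) 2 = PySem.Int.floordiv m 2 + 1 := by
  rw [PySem.Int.floordiv_eq_ediv_of_pos (by norm_num), PySem.Int.floordiv_eq_ediv_of_pos (by norm_num)]
  omega

lemma solve_eq_alt (a : List Int) : solve a = solve_alt a := by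
  induction a using List.reverseRecOn with
  | nil => decide
  | append_singleton l x ih =>
    have hA : solve (l ++ [x]) = solve l + ind l x := by
      rw [solve_eq_G, solve_eq_G, G_append l [] x, List.nil_append]
    have hB : solve_alt (l ++ [x]) = solve_alt l + ind l x := by
      rw [salt_eq, salt_eq, S_append, List.length_append]
      have hind : ind l x = 0 ∨ ind l x = 1 := by unfold ind; split_ifs <;> simp
      rcases hind with h | h
      · rw [h]
        have : S l + 2 - 2 * 0 = S l + 2 := by ring
        rw [this, floordiv_add_two]
        simp only [List.length_singleton]
        push_cast
        ring
      · rw [h]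
        have : S l + 2 - 2 * 1 = S l := by ring
        rw [this]
        simp only [List.length_singleton]
        push_cast
        ring
    rw [hA, hB, ih]

-- ===== VERDICT (by name: the statement is the Claim_ definition above) =====
theorem solve_spec : Claim_equal_solve := by
  intro a _
  unfold Spec_solve
  exact solve_eq_alt a
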